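-- pv_equiv track=rewrite | github.com/PeytonAndras/ais_project | test_ais_system.py | nrzi_encode
-- ===== SOURCE A (Python) =====
-- def nrzi_encode(bits):
--     """NRZI encoding"""
--     if not bits:
--         return []
--
--     encoded = [0]
--     current = 0
--
--     for bit in bits:
--         if bit == 0:
--             current = 1 - current
--         encoded.append(current)
--
--     return encoded[1:]
-- ===== SOURCE B (Python) =====
-- def nrzi_encode(bits):
--     """NRZI encoding by divide and conquer: encode each half independently
--     (each starting from level 0); if the left half ends on level 1, the whole
--     right half is inverted, since NRZI levels after an odd number of zeros are
--     the complement of the levels computed from a fresh 0 start."""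
--     n = len(bits)
--     if n == 0:
--         return []
--     if n == 1:
--         return [1 if bits[0] == 0 else 0]
--     mid = n // 2
--     left = nrzi_encode(bits[:mid])
--     right = nrzi_encode(bits[mid:])
--     if left[-1] == 1:
--         right = [1 - x for x in right]
--     return left + right
-- ===== Notes on version B (the rewrite author's own statement) =====
-- stated objective: alternative
-- what changed: Replaces the single sequential toggle loop by a divide-and-conquer recursion: each half is encoded independently from a fresh 0 level and the right half is complemented when the left half ends on level 1.
import Mathlib
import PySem

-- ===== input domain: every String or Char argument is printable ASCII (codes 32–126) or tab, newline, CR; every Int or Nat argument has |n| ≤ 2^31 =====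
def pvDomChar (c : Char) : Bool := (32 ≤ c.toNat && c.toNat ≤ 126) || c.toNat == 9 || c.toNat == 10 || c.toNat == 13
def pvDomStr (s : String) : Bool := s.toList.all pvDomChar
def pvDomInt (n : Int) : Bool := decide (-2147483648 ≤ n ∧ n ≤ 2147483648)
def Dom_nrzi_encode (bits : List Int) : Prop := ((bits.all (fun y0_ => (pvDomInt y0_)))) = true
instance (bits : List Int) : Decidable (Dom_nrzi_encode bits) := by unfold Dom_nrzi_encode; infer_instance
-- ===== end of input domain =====

-- ===== PORT A =====
-- B re-implements the sequential toggle loop as a divide-and-conquer recursion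
-- (encode halves independently, complement the right half when the left ends on 1);
-- exact equivalence proved on Dom.
def nrzi_encode (bits : List Int) : List Int :=
  if bits = [] then []
  else
    let st := bits.foldl (fun (s : List Int × Int) bit =>
      let current := if bit = 0 then 1 - s.2 else s.2
      (s.1 ++ [current], current)) ([0], 0)
    st.1.drop 1

-- ===== PORT B =====
-- bits[:mid] / bits[mid:] are ported as take/drop (exact: 0 ≤ mid ≤ len bits);
-- bits[0] and left[-1] via PySem.List.pyGetD (exact: both lists are nonempty there).
def nrzi_encode_alt (bits : List Int) : List Int :=
  let n := bits.length
  if n = 0 then []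
  else if n = 1 then [if PySem.List.pyGetD bits 0 0 = 0 then 1 else 0]
  else
    let mid := n / 2
    let left := nrzi_encode_alt (bits.take mid)
    let right := nrzi_encode_alt (bits.drop mid)
    let right' := if PySem.List.pyGetD left (-1) 0 = 1 then right.map (fun x => 1 - x) else right
    left ++ right'
termination_by bits.length
decreasing_by
  · simp only [List.length_take]; omega
  · simp only [List.length_drop]; omega

-- ===== PRECONDITION & SPEC =====
def Spec_nrzi_encode (bits : List Int) (out : List Int) : Prop := out = nrzi_encode_alt bits
instance (bits : List Int) (out : List Int) : Decidable (Spec_nrzi_encode bits out) := by unfold Spec_nrzi_encode; infer_instance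

-- ===== CLAIM (what is proved, stated in full; the proofs are below) =====
def Claim_equal_nrzi_encode : Prop := ∀ (bits : List Int), Dom_nrzi_encode bits → Spec_nrzi_encode bits (nrzi_encode bits)

-- ===== LEMMAS AND PROOFS =====

-- reference recursion: the NRZI level sequence starting from level `cur`
def nrziSpec (bits : List Int) (cur : Int) : List Int :=
  match bits with
  | [] => []
  | b :: rest =>
    let c := if b = 0 then 1 - cur else cur
    c :: nrziSpec rest c

lemma pv_getLastD_irrel (a c d : Int) (l : List Int) :
    (a :: l).getLast?.getD c = (a :: l).getLast?.getD d := by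
  induction l generalizing a with
  | nil => simp
  | cons x xs ih => simpa using ih x

lemma pv_getLastD_cons (a d : Int) (l : List Int) :
    (a :: l).getLast?.getD d = l.getLast?.getD a := by
  cases l with
  | nil => simp
  | cons x xs =>
    rw [List.getLast?_cons_cons]
    exact pv_getLastD_irrel x d a xs

lemma nrzi_fold (bits : List Int) (acc : List Int) (c : Int) :
    bits.foldl (fun (s : List Int × Int) bit =>
      let current := if bit = 0 then 1 - s.2 else s.2
      (s.1 ++ [current], current)) (acc, c)
    = (acc ++ nrziSpec bits c, (nrziSpec bits c).getLastD c) := by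
  induction bits generalizing acc c with
  | nil => simp [nrziSpec]
  | cons b rest ih =>
    simp only [List.foldl_cons, nrziSpec]
    rw [ih]
    simp only [List.getLastD_eq_getLast?, List.append_assoc, List.singleton_append,
      pv_getLastD_cons]

lemma nrziSpec_flip (bits : List Int) (c : Int) :
    nrziSpec bits (1 - c) = (nrziSpec bits c).map (fun x => 1 - x) := by
  induction bits generalizing c with
  | nil => simp [nrziSpec]
  | cons b rest ih =>
    by_cases hb : b = 0
    · simp only [nrziSpec, hb, if_true, List.map_cons]
      rw [ih (1 - c)]
    · simp [nrziSpec, hb, ih c]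

lemma nrziSpec_append (xs ys : List Int) (c : Int) :
    nrziSpec (xs ++ ys) c
    = nrziSpec xs c ++ nrziSpec ys ((nrziSpec xs c).getLastD c) := by
  induction xs generalizing c with
  | nil => simp [nrziSpec]
  | cons b rest ih =>
    simp only [List.cons_append, nrziSpec, ih, List.getLastD_eq_getLast?,
      pv_getLastD_cons]

lemma nrziSpec_last01 (bits : List Int) (c : Int) (hc : c = 0 ∨ c = 1) :
    (nrziSpec bits c).getLastD c = 0 ∨ (nrziSpec bits c).getLastD c = 1 := by
  induction bits generalizing c with
  | nil => simpa [nrziSpec]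
  | cons b rest ih =>
    simp only [nrziSpec, List.getLastD_cons]
    exact ih _ (by rcases hc with h | h <;> by_cases hb : b = 0 <;> simp [hb, h])

lemma nrziSpec_ne_nil (bits : List Int) (c : Int) (h : bits ≠ []) :
    nrziSpec bits c ≠ [] := by
  cases bits with
  | nil => exact absurd rfl h
  | cons b rest => simp [nrziSpec]

lemma alt_eq_spec : ∀ (k : Nat) (bits : List Int), bits.length ≤ k →
    nrzi_encode_alt bits = nrziSpec bits 0 := by
  intro k
  induction k with
  | zero =>
    intro bits h
    have : bits = [] := List.length_eq_zero_iff.mp (Nat.le_zero.mp h)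
    subst this
    rw [nrzi_encode_alt]
    simp [nrziSpec]
  | succ k ih =>
    intro bits hlen
    rw [nrzi_encode_alt]
    by_cases h0 : bits.length = 0
    · have : bits = [] := List.length_eq_zero_iff.mp h0
      subst this; simp [nrziSpec]
    by_cases h1 : bits.length = 1
    · obtain ⟨b, hb⟩ := List.length_eq_one_iff.mp h1
      subst hb
      by_cases hb0 : b = 0 <;>
        simp [nrziSpec, hb0, PySem.List.pyGetD, PySem.List.pyIdx?, PySem.List.pyGet?]
    · simp only [h0, if_false, h1, if_false]
      have hlen2 : 2 ≤ bits.length := by omega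
      set mid := bits.length / 2 with hmid
      have hmid1 : 1 ≤ mid := by omega
      have hmidlt : mid < bits.length := by omega
      have hL : nrzi_encode_alt (bits.take mid) = nrziSpec (bits.take mid) 0 := by
        apply ih; simp [List.length_take]; omega
      have hR : nrzi_encode_alt (bits.drop mid) = nrziSpec (bits.drop mid) 0 := by
        apply ih; simp [List.length_drop]; omega
      rw [hL, hR]
      have htake : bits.take mid ≠ [] := by
        intro h
        have := congrArg List.length h
        rw [List.length_take] at this
        simp only [List.length_nil] at this
        omega
      have hspec_ne : nrziSpec (bits.take mid) 0 ≠ [] := nrziSpec_ne_nil _ _ htake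
      have hget : PySem.List.pyGetD (nrziSpec (bits.take mid) 0) (-1) 0
          = (nrziSpec (bits.take mid) 0).getLastD 0 := by
        rw [PySem.List.pyGetD_neg_one _ _ hspec_ne]
        rw [List.getLastD_eq_getLast?, List.getLast?_eq_some_getLast hspec_ne]
        rfl
      conv_rhs => rw [← List.take_append_drop mid bits]
      rw [nrziSpec_append]
      rw [hget]
      rcases nrziSpec_last01 (bits.take mid) 0 (Or.inl rfl) with hlast | hlast
      · rw [hlast]; simp
      · rw [hlast]
        rw [if_pos rfl]
        congr 1
        have := nrziSpec_flip (bits.drop mid) 0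
        simpa using this.symm

theorem nrzi_encode_spec : Claim_equal_nrzi_encode := by
  intro bits _
  unfold Spec_nrzi_encode nrzi_encode
  rw [alt_eq_spec bits.length bits le_rfl]
  by_cases h : bits = []
  · simp [h, nrziSpec]
  · simp only [h, if_false]
    rw [nrzi_fold]
    simp
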